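-- pv_equiv track=rewrite | github.com/hash451722/shogi-recorder | converter.py | convert_sfen
-- ===== SOURCE A (Python) =====
-- def convert_sfen(list81:list) -> str:
--     '''
--     sfen形式に変換
--     input: list81
--     return : str  ( [次の手番] [持ち駒] [次は何手目] は除く)
--     '''
--
--     # Conversion dictionary for SFEN notation
--     cnv = { "ou":"k", "hi":"r", "ka":"b",
--             "ki":"g", "gi":"s", "ke":"n", "ky":"l", "fu":"p",
--             "ry": "+r", "um":"+b", "ng":"+s", "nk":"+n", "ny":"+l", "to":"+p"}
--
--     sfen = ""
--     empty_count = 0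
--     for i, s in enumerate(list81):
--         # delimiter / (slash)
--         if i > 0 and (i % 9) == 0:
--             sfen += str(empty_count)
--             empty_count = 0
--             sfen += "/"
--
--         if s[0] == "b":  # black piece
--             sfen += str(empty_count)
--             empty_count = 0
--             sfen += cnv[s[1:]].upper()
--
--         elif s[0] == "w":  # white piece
--             sfen += str(empty_count)
--             empty_count = 0
--             sfen += cnv[s[1:]].lower()
--
--         else:  # empty cell
--             empty_count += 1
--
--     sfen += str(empty_count)
--     return sfen.replace("0", "")
-- ===== SOURCE B (Python) =====
-- def convert_sfen(list81: list) -> str: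
--     '''Row-chunked rewrite: build each rank of 9 cells separately with a
--     conditional empty-counter flush, then join the ranks with "/" —
--     no running index modulo and no final replace("0", "").'''
--     cnv = { "ou":"k", "hi":"r", "ka":"b",
--             "ki":"g", "gi":"s", "ke":"n", "ky":"l", "fu":"p",
--             "ry": "+r", "um":"+b", "ng":"+s", "nk":"+n", "ny":"+l", "to":"+p"}
--
--     def row_str(row):
--         acc = ""
--         count = 0
--         for s in row:
--             if s[0] == "b":
--                 if count > 0:
--                     acc += str(count)
--                 count = 0
--                 acc += cnv[s[1:]].upper()
--             elif s[0] == "w":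
--                 if count > 0:
--                     acc += str(count)
--                 count = 0
--                 acc += cnv[s[1:]].lower()
--             else:
--                 count += 1
--         if count > 0:
--             acc += str(count)
--         return acc
--
--     rows = []
--     i = 0
--     while i < len(list81):
--         rows.append(row_str(list81[i:i+9]))
--         i += 9
--     return "/".join(rows)
-- ===== Notes on version B (the rewrite author's own statement) =====
-- stated objective: simpler
-- what changed: Replaces the single indexed pass with i%9 modulo tests, inline slash insertion and a final replace('0','') by chunking the board into rows of 9 and building each row with a conditional counter flush, joining rows with '/'.
import Mathlib
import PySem

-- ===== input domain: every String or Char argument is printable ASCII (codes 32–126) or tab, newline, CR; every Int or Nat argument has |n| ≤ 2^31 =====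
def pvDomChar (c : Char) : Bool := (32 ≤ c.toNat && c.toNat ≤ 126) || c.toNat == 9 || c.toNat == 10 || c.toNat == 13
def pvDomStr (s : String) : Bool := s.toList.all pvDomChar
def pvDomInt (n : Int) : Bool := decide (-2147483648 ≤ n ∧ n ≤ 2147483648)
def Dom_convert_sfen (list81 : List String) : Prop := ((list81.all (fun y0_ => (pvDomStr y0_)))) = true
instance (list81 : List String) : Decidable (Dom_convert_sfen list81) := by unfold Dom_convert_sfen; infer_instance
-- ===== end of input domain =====

-- B chunks the board into rows of 9 and builds each row with a conditional counter flush
-- (objective: simpler — no index modulo, no inline slash, no final replace("0","")).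
-- Equivalence is about the return value; neither program mutates its argument.

-- shared piece-name table (the Python dict literal `cnv`, identical in both sources)
def pvCnv : PySem.Dict String String :=
  PySem.Dict.mk [("ou","k"), ("hi","r"), ("ka","b"),
                 ("ki","g"), ("gi","s"), ("ke","n"), ("ky","l"), ("fu","p"),
                 ("ry","+r"), ("um","+b"), ("ng","+s"), ("nk","+n"), ("ny","+l"), ("to","+p")]

-- ===== PORT A =====
-- The for-loop over enumerate(list81) as structural recursion carrying (i, sfen, empty_count).
-- Strings are kept as List Char (PySem.Chars) and packed with String.ofList at the end.
-- Where the Python raises (s == "" → IndexError; unknown piece name → KeyError) the port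
-- takes a default branch / getD ""; Pre_ excludes exactly those inputs.
def pvLoopA (xs : List String) (i : Nat) (sfen : List Char) (cnt : Int) : List Char × Int :=
  match xs with
  | [] => (sfen, cnt)
  | s :: rest =>
    -- if i > 0 and (i % 9) == 0:
    let st := if 0 < i ∧ i % 9 = 0 then (sfen ++ PySem.Int.toChars cnt ++ ['/'], (0 : Int)) else (sfen, cnt)
    match PySem.Str.pyGet? s 0 with
    | some c =>
      if c = 'b' then
        pvLoopA rest (i+1) (st.1 ++ PySem.Int.toChars st.2 ++ PySem.Chars.upper (pvCnv.getD (PySem.Str.slice s (some 1) none) "").toList) 0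
      else if c = 'w' then
        pvLoopA rest (i+1) (st.1 ++ PySem.Int.toChars st.2 ++ PySem.Chars.lower (pvCnv.getD (PySem.Str.slice s (some 1) none) "").toList) 0
      else
        pvLoopA rest (i+1) st.1 (st.2 + 1)
    | none => pvLoopA rest (i+1) st.1 (st.2 + 1)   -- s == "": Python raises IndexError (outside Pre_)

def convert_sfen (list81 : List String) : String :=
  let r := pvLoopA list81 0 [] 0
  String.ofList (PySem.Chars.replace (r.1 ++ PySem.Int.toChars r.2) ['0'] [])

-- ===== PORT B =====
-- transliteration of Source B: a per-row fold with conditional flush, rows of 9, joined by '/'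
def pvFlush (cnt : Int) : List Char := if 0 < cnt then PySem.Int.toChars cnt else []

def pvRowStep (st : List Char × Int) (s : String) : List Char × Int :=
  match PySem.Str.pyGet? s 0 with
  | some c =>
    if c = 'b' then
      (st.1 ++ pvFlush st.2 ++ PySem.Chars.upper (pvCnv.getD (PySem.Str.slice s (some 1) none) "").toList, 0)
    else if c = 'w' then
      (st.1 ++ pvFlush st.2 ++ PySem.Chars.lower (pvCnv.getD (PySem.Str.slice s (some 1) none) "").toList, 0)
    else
      (st.1, st.2 + 1)
  | none => (st.1, st.2 + 1)

def pvRow (row : List String) : List Char :=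
  let st := row.foldl pvRowStep ([], 0)
  st.1 ++ pvFlush st.2

-- the while-loop: while i < len(list81): append row_str(list81[i:i+9]); i += 9
def pvRowsLoop (cells : List String) (i : Nat) : List (List Char) :=
  if h : i < cells.length then
    pvRow (PySem.List.slice cells (some (i : Int)) (some ((i : Int) + 9))) :: pvRowsLoop cells (i + 9)
  else []
termination_by cells.length - i
decreasing_by omega

def convert_sfen_alt (list81 : List String) : String :=
  String.ofList (PySem.Chars.join ['/'] (pvRowsLoop list81 0))

-- ===== PRECONDITION & SPEC =====
def pvKeyList : List String := ["ou","hi","ka","ki","gi","ke","ky","fu","ry","um","ng","nk","ny","to"]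

-- Pre_ excludes exactly the inputs on which the Python A raises: a cell that is the empty
-- string (IndexError on s[0]) or a cell starting with 'b'/'w' whose tail is not a key of cnv
-- (KeyError).  B raises the same exceptions there.
def Pre_convert_sfen (list81 : List String) : Prop :=
  ∀ s ∈ list81, (PySem.Str.pyGet? s 0).isSome = true ∧
    ((PySem.Str.pyGet? s 0 = some 'b' ∨ PySem.Str.pyGet? s 0 = some 'w') →
      PySem.Str.slice s (some 1) none ∈ pvKeyList)
instance (list81 : List String) : Decidable (Pre_convert_sfen list81) := by
  unfold Pre_convert_sfen; infer_instance

def pvWitness_convert_sfen : List String :=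
  ["bfu", "e", "wou", "e", "e", "e", "e", "e", "e", "wry", "e"]

def Spec_convert_sfen (list81 : List String) (out : String) : Prop := out = convert_sfen_alt list81
instance (list81 : List String) (out : String) : Decidable (Spec_convert_sfen list81 out) := by unfold Spec_convert_sfen; infer_instance

-- ===== CLAIM (what is proved, stated in full; the proofs are below) =====
def Claim_equal_convert_sfen : Prop := ∀ (list81 : List String), Dom_convert_sfen list81 → Pre_convert_sfen list81 → Spec_convert_sfen list81 (convert_sfen list81)

-- ===== LEMMAS AND PROOFS =====

-- proof-side view of the row chunking: structural take/drop recursion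
def pvRowsR (cells : List String) : List (List Char) :=
  if h : cells = [] then []
  else pvRow (cells.take 9) :: pvRowsR (cells.drop 9)
termination_by cells.length
decreasing_by
  have h' : cells.length ≠ 0 := by simpa [List.length_eq_zero_iff] using h
  simp only [List.length_drop]; omega

-- the port's index loop computes exactly pvRowsR of the remaining cells
lemma pvRowsLoop_eq : ∀ (k : Nat) (cells : List String) (i : Nat), cells.length - i ≤ k →
    pvRowsLoop cells i = pvRowsR (cells.drop i) := by
  intro k
  induction k with
  | zero =>
    intro cells i h
    rw [pvRowsLoop, dif_neg (by omega), pvRowsR, dif_pos (by rw [List.drop_eq_nil_iff]; omega)]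
  | succ k ihk =>
    intro cells i h
    by_cases hi : i < cells.length
    · rw [pvRowsLoop, dif_pos hi, pvRowsR,
        dif_neg (by rw [List.drop_eq_nil_iff]; omega)]
      have h9 : ((9:Nat) : Int) = (9 : Int) := by norm_num
      rw [← h9, PySem.List.slice_natCast_add, ihk cells (i + 9) (by omega),
        List.drop_drop]
    · rw [pvRowsLoop, dif_neg hi, pvRowsR, dif_pos (by rw [List.drop_eq_nil_iff]; omega)]

-- strip = what replace(sfen, "0", "") does: remove every '0'
def pvStrip (cs : List Char) : List Char := cs.filter (· ≠ '0')

lemma pvReplaceGo_eq_filter : ∀ (fuel : Nat) (l acc : List Char), l.length ≤ fuel →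
    PySem.Chars.replace.go ['0'] [] fuel l acc = acc.reverse ++ pvStrip l := by
  intro fuel
  induction fuel with
  | zero =>
    intro l acc h
    have hl : l = [] := by cases l <;> simp_all
    subst hl
    simp [PySem.Chars.replace.go, pvStrip]
  | succ fuel ih =>
    intro l acc h
    cases l with
    | nil => simp [PySem.Chars.replace.go, pvStrip]
    | cons c t =>
      by_cases hc : c = '0'
      · subst hc
        have hpre : ['0'].isPrefixOf ('0' :: t) = true := by simp [List.isPrefixOf]
        rw [PySem.Chars.replace.go, if_pos hpre]
        simp only [List.length_cons] at h
        simpa [pvStrip] using ih t acc (by omega)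
      · have hpre : ['0'].isPrefixOf (c :: t) = false := by
          simp only [List.isPrefixOf, List.isPrefixOf_nil_left, Bool.and_true, beq_iff_eq, beq_eq_false_iff_ne, ne_eq]
          exact fun h => hc h.symm
        rw [PySem.Chars.replace.go, if_neg (by simp [hpre])]
        simp only [List.length_cons] at h
        rw [ih t (c :: acc) (by omega)]
        simp [pvStrip, hc]

lemma pvReplace_eq_strip (cs : List Char) : PySem.Chars.replace cs ['0'] [] = pvStrip cs := by
  rw [PySem.Chars.replace]
  simp only [List.isEmpty_cons, if_false, Bool.false_eq_true]
  simpa using pvReplaceGo_eq_filter cs.length cs [] le_rfl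

lemma pvStrip_append (a b : List Char) : pvStrip (a ++ b) = pvStrip a ++ pvStrip b := by
  simp [pvStrip]

lemma pvStrip_toChars (cnt : Int) (h0 : 0 ≤ cnt) (h9 : cnt ≤ 9) :
    pvStrip (PySem.Int.toChars cnt) = pvFlush cnt := by
  interval_cases cnt <;> decide

-- a piece string from the table contains no '0'
lemma pvStrip_upper (k : String) (hk : k ∈ pvKeyList) :
    pvStrip (PySem.Chars.upper (pvCnv.getD k "").toList) = PySem.Chars.upper (pvCnv.getD k "").toList := by
  fin_cases hk <;> decide

lemma pvStrip_lower (k : String) (hk : k ∈ pvKeyList) :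
    pvStrip (PySem.Chars.lower (pvCnv.getD k "").toList) = PySem.Chars.lower (pvCnv.getD k "").toList := by
  fin_cases hk <;> decide

-- A's inner step with the flush stripped out (what runs strictly inside a row)
def pvStepNF (st : List Char × Int) (s : String) : List Char × Int :=
  match PySem.Str.pyGet? s 0 with
  | some c =>
    if c = 'b' then
      (st.1 ++ PySem.Int.toChars st.2 ++ PySem.Chars.upper (pvCnv.getD (PySem.Str.slice s (some 1) none) "").toList, 0)
    else if c = 'w' then
      (st.1 ++ PySem.Int.toChars st.2 ++ PySem.Chars.lower (pvCnv.getD (PySem.Str.slice s (some 1) none) "").toList, 0)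
    else
      (st.1, st.2 + 1)
  | none => (st.1, st.2 + 1)

lemma pvLoopA_step (s : String) (l : List String) (i : Nat) (sfen : List Char) (cnt : Int)
    (hns : ¬ (0 < i ∧ i % 9 = 0)) :
    pvLoopA (s :: l) i sfen cnt = pvLoopA l (i+1) (pvStepNF (sfen, cnt) s).1 (pvStepNF (sfen, cnt) s).2 := by
  simp only [pvLoopA, pvStepNF, if_neg hns]
  rcases hE : PySem.Str.pyGet? s 0 with _ | c
  · rfl
  · by_cases hb : c = 'b'
    · simp [hb]
    · by_cases hw : c = 'w' <;> simp [hb, hw]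

lemma pvLoopA_flush (s : String) (l : List String) (i : Nat) (sfen : List Char) (cnt : Int)
    (hfl : 0 < i ∧ i % 9 = 0) :
    pvLoopA (s :: l) i sfen cnt =
      pvLoopA l (i+1) (pvStepNF (sfen ++ PySem.Int.toChars cnt ++ ['/'], 0) s).1
        (pvStepNF (sfen ++ PySem.Int.toChars cnt ++ ['/'], 0) s).2 := by
  simp only [pvLoopA, pvStepNF, if_pos hfl]
  rcases hE : PySem.Str.pyGet? s 0 with _ | c
  · rfl
  · by_cases hb : c = 'b'
    · simp [hb]
    · by_cases hw : c = 'w' <;> simp [hb, hw]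

-- SEG: while no index in the segment triggers the slash-flush, pvLoopA is a plain fold
lemma pvLoopA_seg : ∀ (row : List String) (rest : List String) (i : Nat) (sfen : List Char) (cnt : Int),
    (∀ k < row.length, ¬ (0 < i + k ∧ (i + k) % 9 = 0)) →
    pvLoopA (row ++ rest) i sfen cnt =
      pvLoopA rest (i + row.length) (row.foldl pvStepNF (sfen, cnt)).1 (row.foldl pvStepNF (sfen, cnt)).2 := by
  intro row
  induction row with
  | nil => intro rest i sfen cnt _; simp
  | cons s t ih =>
    intro rest i sfen cnt h
    have hns : ¬ (0 < i ∧ i % 9 = 0) := by simpa using h 0 (by simp)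
    have h' : ∀ k < t.length, ¬ (0 < (i+1) + k ∧ ((i+1) + k) % 9 = 0) := by
      intro k hk
      have e : i + (k+1) = i + 1 + k := by omega
      have := h (k+1) (by simp; omega)
      rwa [e] at this
    rw [List.cons_append, pvLoopA_step s (t ++ rest) i sfen cnt hns,
        ih rest (i+1) _ _ h']
    have e2 : i + 1 + t.length = i + (s :: t).length := by simp; omega
    rw [e2]
    simp

-- B-side accumulator lemmas
lemma pvRowStep_one (acc : List Char) (cnt : Int) (s : String) :
    pvRowStep (acc, cnt) s = (acc ++ (pvRowStep ([], cnt) s).1, (pvRowStep ([], cnt) s).2) := by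
  simp only [pvRowStep]
  rcases hE : PySem.Str.pyGet? s 0 with _ | c
  · simp
  · by_cases hb : c = 'b'
    · simp [hb]
    · by_cases hw : c = 'w' <;> simp [hb, hw]

lemma pvRowStep_acc : ∀ (row : List String) (acc : List Char) (cnt : Int),
    row.foldl pvRowStep (acc, cnt) =
      (acc ++ (row.foldl pvRowStep ([], cnt)).1, (row.foldl pvRowStep ([], cnt)).2) := by
  intro row
  induction row with
  | nil => intro acc cnt; simp
  | cons s t ih =>
    intro acc cnt
    rw [List.foldl_cons, List.foldl_cons, pvRowStep_one acc cnt s]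
    rcases hP : pvRowStep ([], cnt) s with ⟨a1, c1⟩
    rw [ih (acc ++ a1) c1, ih a1 c1]
    simp

-- ROW: A's in-row fold equals B's, modulo stripping the '0' flushes
lemma pvRow_eq : ∀ (row : List String) (cnt : Int) (pre : List Char),
    (∀ s ∈ row, (PySem.Str.pyGet? s 0).isSome = true ∧
      ((PySem.Str.pyGet? s 0 = some 'b' ∨ PySem.Str.pyGet? s 0 = some 'w') →
        PySem.Str.slice s (some 1) none ∈ pvKeyList)) →
    0 ≤ cnt → cnt + row.length ≤ 9 →
    (row.foldl pvStepNF (pre, cnt)).2 = (row.foldl pvRowStep ([], cnt)).2 ∧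
    0 ≤ (row.foldl pvStepNF (pre, cnt)).2 ∧
    (row.foldl pvStepNF (pre, cnt)).2 ≤ cnt + row.length ∧
    pvStrip ((row.foldl pvStepNF (pre, cnt)).1) = pvStrip pre ++ (row.foldl pvRowStep ([], cnt)).1 := by
  intro row
  induction row with
  | nil =>
    intro cnt pre _ h0 _
    exact ⟨rfl, h0, by simp, by simp⟩
  | cons s t ih =>
    intro cnt pre hP h0 hlen
    obtain ⟨hs1, hs2⟩ := hP s (by simp)
    have hPt : ∀ x ∈ t, (PySem.Str.pyGet? x 0).isSome = true ∧
        ((PySem.Str.pyGet? x 0 = some 'b' ∨ PySem.Str.pyGet? x 0 = some 'w') →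
          PySem.Str.slice x (some 1) none ∈ pvKeyList) := fun x hx => hP x (by simp [hx])
    simp only [List.length_cons] at hlen
    have h9 : cnt ≤ 9 := by omega
    rcases hE : PySem.Str.pyGet? s 0 with _ | c
    · rw [hE] at hs1; simp at hs1
    · simp only [List.foldl_cons, pvStepNF, pvRowStep, hE]
      by_cases hb : c = 'b'
      · have hk : PySem.Str.slice s (some 1) none ∈ pvKeyList := hs2 (Or.inl (by rw [hE, hb]))
        simp only [hb, reduceIte]
        obtain ⟨e2, epos, ele, e1⟩ :=
          ih 0 (pre ++ PySem.Int.toChars cnt ++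
            PySem.Chars.upper (pvCnv.getD (PySem.Str.slice s (some 1) none) "").toList) hPt le_rfl (by omega)
        rw [pvRowStep_acc t ([] ++ pvFlush cnt ++
          PySem.Chars.upper (pvCnv.getD (PySem.Str.slice s (some 1) none) "").toList) 0]
        refine ⟨by simpa using e2, epos, ?_, ?_⟩
        · simp only [List.length_cons]; push_cast; push_cast at ele e2; omega
        rw [e1]
        simp [pvStrip_append, pvStrip_toChars cnt h0 h9, pvStrip_upper _ hk]
      · by_cases hw : c = 'w'
        · have hk : PySem.Str.slice s (some 1) none ∈ pvKeyList := hs2 (Or.inr (by rw [hE, hw]))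
          simp only [hw, if_neg (show ¬ ('w' : Char) = 'b' from by decide), reduceIte]
          obtain ⟨e2, epos, ele, e1⟩ :=
            ih 0 (pre ++ PySem.Int.toChars cnt ++
              PySem.Chars.lower (pvCnv.getD (PySem.Str.slice s (some 1) none) "").toList) hPt le_rfl (by omega)
          rw [pvRowStep_acc t ([] ++ pvFlush cnt ++
            PySem.Chars.lower (pvCnv.getD (PySem.Str.slice s (some 1) none) "").toList) 0]
          refine ⟨by simpa using e2, epos, ?_, ?_⟩
          · simp only [List.length_cons]; push_cast; push_cast at ele e2; omega
          rw [e1]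
          simp [pvStrip_append, pvStrip_toChars cnt h0 h9, pvStrip_lower _ hk]
        · simp only [if_neg hb, if_neg hw]
          obtain ⟨e2, epos, ele, e1⟩ := ih (cnt + 1) pre hPt (by omega) (by omega)
          refine ⟨e2, epos, ?_, e1⟩
          simp only [List.length_cons]; push_cast; push_cast at ele e2; omega

-- MAIN: from any row boundary, the stripped rest-of-A equals the '/'-joined rest-of-B
lemma pvMain : ∀ (n : Nat) (cells : List String), cells.length ≤ n → cells ≠ [] →
    Pre_convert_sfen cells →
    ∀ (i : Nat) (cnt : Int) (sfen : List Char), i % 9 = 0 → 0 ≤ cnt → cnt ≤ 9 → (i = 0 → cnt = 0) →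
    pvStrip ((pvLoopA cells i sfen cnt).1 ++ PySem.Int.toChars (pvLoopA cells i sfen cnt).2) =
      pvStrip sfen ++ (if i = 0 then [] else pvFlush cnt ++ ['/']) ++ PySem.Chars.join ['/'] (pvRowsR cells) := by
  intro n
  induction n with
  | zero =>
    intro cells hlen hne _
    cases cells with
    | nil => exact absurd rfl hne
    | cons a b => simp at hlen
  | succ n ih =>
    intro cells hlen hne hpre i cnt sfen hi h0 h9 hz
    obtain ⟨s, cs, rfl⟩ : ∃ s cs, cells = s :: cs := by
      cases cells with
      | nil => exact absurd rfl hne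
      | cons a b => exact ⟨a, b, rfl⟩
    have hrowP : ∀ x ∈ (s :: cs).take 9, (PySem.Str.pyGet? x 0).isSome = true ∧
        ((PySem.Str.pyGet? x 0 = some 'b' ∨ PySem.Str.pyGet? x 0 = some 'w') →
          PySem.Str.slice x (some 1) none ∈ pvKeyList) :=
      fun x hx => hpre x (List.mem_of_mem_take hx)
    have hrestP : Pre_convert_sfen ((s :: cs).drop 9) :=
      fun x hx => hpre x (List.mem_of_mem_drop hx)
    have hrowlen9 : ((s :: cs).take 9).length ≤ 9 := by
      simp [List.length_take]
    -- reduce A to the state at the end of the current row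
    have key : ∀ pre0 : List Char,
        pre0 = (if i = 0 then sfen else sfen ++ PySem.Int.toChars cnt ++ ['/']) →
        pvLoopA (s :: cs) i sfen cnt =
          pvLoopA ((s :: cs).drop 9) (i + ((s :: cs).take 9).length)
            (((s :: cs).take 9).foldl pvStepNF (pre0, 0)).1
            (((s :: cs).take 9).foldl pvStepNF (pre0, 0)).2 := by
      intro pre0 hpre0
      by_cases hi0 : i = 0
      · subst hi0
        rw [if_pos rfl] at hpre0
        rw [hpre0]
        have hcnt : cnt = 0 := hz rfl
        subst hcnt
        have hnf : ∀ k < ((s :: cs).take 9).length, ¬ (0 < 0 + k ∧ (0 + k) % 9 = 0) := by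
          intro k hk
          have : k < 9 := lt_of_lt_of_le hk hrowlen9
          omega
        conv_lhs => rw [show s :: cs = (s :: cs).take 9 ++ (s :: cs).drop 9 from
          (List.take_append_drop 9 (s :: cs)).symm]
        exact pvLoopA_seg ((s :: cs).take 9) ((s :: cs).drop 9) 0 sfen 0 hnf
      · rw [if_neg hi0] at hpre0
        rw [hpre0]
        have hipos : 0 < i := Nat.pos_of_ne_zero hi0
        have hnf8 : ∀ k < (cs.take 8).length, ¬ (0 < (i+1) + k ∧ ((i+1) + k) % 9 = 0) := by
          have : (cs.take 8).length ≤ 8 := by simp [List.length_take]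
          intro k hk
          omega
        rw [pvLoopA_flush s cs i sfen cnt ⟨hipos, hi⟩]
        conv_lhs => rw [show cs = cs.take 8 ++ cs.drop 8 from (List.take_append_drop 8 cs).symm]
        rw [pvLoopA_seg (cs.take 8) (cs.drop 8) (i+1) _ _ hnf8]
        have hidx : (i+1) + (cs.take 8).length = i + ((s :: cs).take 9).length := by
          simp [List.take_succ_cons]; omega
        rw [hidx, List.take_succ_cons, List.drop_succ_cons, List.foldl_cons]
    have hpre0strip : pvStrip (if i = 0 then sfen else sfen ++ PySem.Int.toChars cnt ++ ['/']) =
        pvStrip sfen ++ (if i = 0 then [] else pvFlush cnt ++ ['/']) := by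
      by_cases hi0 : i = 0
      · simp [hi0]
      · rw [if_neg hi0, if_neg hi0, pvStrip_append, pvStrip_append, pvStrip_toChars cnt h0 h9]
        simp [pvStrip]
    obtain ⟨e2, epos, ele, e1⟩ := pvRow_eq ((s :: cs).take 9) 0
      (if i = 0 then sfen else sfen ++ PySem.Int.toChars cnt ++ ['/']) hrowP le_rfl (by omega)
    rw [key _ rfl]
    by_cases hr : (s :: cs).drop 9 = []
    · rw [hr]
      simp only [pvLoopA]
      rw [pvStrip_append, e1, pvStrip_toChars _ epos (by omega), e2, hpre0strip]
      have hrowsb : pvRowsR (s :: cs) = [pvRow ((s :: cs).take 9)] := by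
        rw [pvRowsR, dif_neg (List.cons_ne_nil s cs), hr]
        simp [pvRowsR]
      rw [hrowsb, PySem.Chars.join_singleton]
      simp [pvRow, List.append_assoc]
    · have hcs8 : 8 ≤ cs.length := by
        by_contra hle
        exact hr (List.drop_eq_nil_iff.mpr (by simp; omega))
      have hrow9 : ((s :: cs).take 9).length = 9 := by
        simp [List.length_take]; omega
      have hlen' : cs.length + 1 ≤ n + 1 := by simpa using hlen
      have ihres := ih ((s :: cs).drop 9) (by simp [List.length_drop]; omega) hr hrestP
        (i + ((s :: cs).take 9).length)
        ((((s :: cs).take 9).foldl pvStepNF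
          ((if i = 0 then sfen else sfen ++ PySem.Int.toChars cnt ++ ['/']), 0)).2)
        ((((s :: cs).take 9).foldl pvStepNF
          ((if i = 0 then sfen else sfen ++ PySem.Int.toChars cnt ++ ['/']), 0)).1)
        (by omega) epos (by omega) (by omega)
      rw [ihres, if_neg (show ¬ (i + ((s :: cs).take 9).length = 0) from by omega), e1, e2, hpre0strip]
      have hrowsb : pvRowsR (s :: cs) = pvRow ((s :: cs).take 9) :: pvRowsR ((s :: cs).drop 9) := by
        rw [pvRowsR, dif_neg (List.cons_ne_nil s cs)]
      obtain ⟨q, qs, hq⟩ : ∃ q qs, pvRowsR ((s :: cs).drop 9) = q :: qs := by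
        rw [pvRowsR, dif_neg hr]
        exact ⟨_, _, rfl⟩
      rw [hrowsb, hq, PySem.Chars.join_cons_cons]
      simp [pvRow, List.append_assoc]

-- ===== VERDICT (by name: the statement is the Claim_ definition above) =====
theorem convert_sfen_spec : Claim_equal_convert_sfen := by
  intro l _ hpre
  unfold Spec_convert_sfen convert_sfen convert_sfen_alt
  by_cases hl : l = []
  · subst hl
    show String.ofList (PySem.Chars.replace ((pvLoopA [] 0 [] 0).1 ++
      PySem.Int.toChars (pvLoopA [] 0 [] 0).2) ['0'] []) = _
    rw [pvReplace_eq_strip, pvRowsLoop_eq 0 [] 0 (by simp), List.drop_zero,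
      show pvRowsR ([] : List String) = [] from by rw [pvRowsR]; rfl]
    exact congrArg String.ofList (by decide)
  · have h := pvMain l.length l le_rfl hl hpre 0 0 [] rfl le_rfl (by norm_num) (fun _ => rfl)
    rw [if_pos rfl] at h
    simp only [show pvStrip ([] : List Char) = [] from rfl, List.nil_append] at h
    show String.ofList (PySem.Chars.replace ((pvLoopA l 0 [] 0).1 ++
      PySem.Int.toChars (pvLoopA l 0 [] 0).2) ['0'] []) = _
    rw [pvReplace_eq_strip, pvRowsLoop_eq l.length l 0 (by omega), List.drop_zero, h]
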